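-- pv_equiv track=rewrite | github.com/huntermussel/IRon | scripts/deterministic_clone_finder.py | winnow
-- ===== SOURCE A (Python) =====
-- from collections import defaultdict, deque
-- from typing import Dict, Iterable, List, Optional, Set, Tuple
--
-- def winnow(hashes: List[int], window: int) -> Set[int]:
--     """
--     Winnowing: choose minimum hash in each window (with rightmost tie-break).
--     """
--     if not hashes:
--         return set()
--     if window <= 1:
--         return set(hashes)
--
--     selected: Set[int] = set()
--     dq = deque()  # (hash, idx)
--
--     for i, hv in enumerate(hashes):
--         # pop bigger hashes from the right
--         while dq and dq[-1][0] >= hv: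
--             dq.pop()
--         dq.append((hv, i))
--         # drop left elements outside window
--         while dq and dq[0][1] <= i - window:
--             dq.popleft()
--         # start selecting once we have a full window
--         if i >= window - 1 and dq:
--             selected.add(dq[0][0])
--     return selected
-- ===== SOURCE B (Python) =====
-- def winnow(hashes, window):
--     """Winnowing via direct per-window minimum (simpler; no deque)."""
--     if not hashes:
--         return set()
--     if window <= 1:
--         return set(hashes)
--     return {min(hashes[j:j + window]) for j in range(len(hashes) - window + 1)}
-- ===== Notes on version B (the rewrite author's own statement) =====
-- stated objective: simpler
-- what changed: Replaces A's monotonic deque (amortized O(n) sliding-window minimum with index bookkeeping) by directly taking min(hashes[j:j+window]) for each window start in a set comprehension; the two early-return guards are kept.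
import Mathlib
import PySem

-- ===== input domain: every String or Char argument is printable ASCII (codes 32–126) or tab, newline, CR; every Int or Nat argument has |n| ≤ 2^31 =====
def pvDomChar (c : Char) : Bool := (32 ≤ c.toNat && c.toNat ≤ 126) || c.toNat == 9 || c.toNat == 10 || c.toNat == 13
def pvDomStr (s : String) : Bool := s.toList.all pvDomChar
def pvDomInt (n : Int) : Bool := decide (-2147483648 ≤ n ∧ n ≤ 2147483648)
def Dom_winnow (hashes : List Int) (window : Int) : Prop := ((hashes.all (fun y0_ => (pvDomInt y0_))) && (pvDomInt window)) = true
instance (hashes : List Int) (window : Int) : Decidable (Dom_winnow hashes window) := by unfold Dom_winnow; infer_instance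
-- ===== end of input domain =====

-- B replaces A's monotonic deque with a direct minimum over each window slice (simpler, same output; not faster).

-- ===== PORT A =====
-- loop body of A's 'for i, hv in enumerate(hashes)'; the right-pops 'while dq and dq[-1][0] >= hv: dq.pop()'
-- are a dropWhile on the reversed deque, the left-pops 'while dq and dq[0][1] <= i - window' a dropWhile.
def winnowStep (window : Int) (st : List Int × List (Int × Int)) (p : Int × Int) : List Int × List (Int × Int) :=
  let i := p.1
  let hv := p.2
  let dq1 := (st.2.reverse.dropWhile (fun q => decide (hv ≤ q.1))).reverse
  let dq2 := dq1 ++ [(hv, i)]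
  let dq3 := dq2.dropWhile (fun q => decide (q.2 ≤ i - window))
  -- if i >= window - 1 and dq: selected.add(dq[0][0])
  (if window - 1 ≤ i then
     match dq3 with
     | [] => st.1
     | q :: _ => PySem.Set.add st.1 q.1
   else st.1, dq3)

def winnow (hashes : List Int) (window : Int) : List Int :=
  if hashes = [] then []
  else if window ≤ 1 then PySem.Set.ofList hashes
  else ((PySem.List.enumerate hashes).foldl (winnowStep window) (([], []) : List Int × List (Int × Int))).1

-- ===== PORT B =====
def winnow_alt (hashes : List Int) (window : Int) : List Int :=
  if hashes = [] then []
  else if window ≤ 1 then PySem.Set.ofList hashes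
  else
    (PySem.List.pyRange 0 (PySem.List.len hashes - window + 1)).foldl
      (fun acc j =>
        match PySem.List.min? (PySem.List.slice hashes (some j) (some (j + window))) (fun x => x) with
        | none => acc  -- unreachable: each window slice is nonempty
        | some m => PySem.Set.add acc m) []

-- ===== PRECONDITION & SPEC =====
def Spec_winnow (hashes : List Int) (window : Int) (out : List Int) : Prop := out = winnow_alt hashes window
instance (hashes : List Int) (window : Int) (out : List Int) : Decidable (Spec_winnow hashes window out) := by unfold Spec_winnow; infer_instance

-- ===== CLAIM (what is proved, stated in full; the proofs are below) =====
def Claim_equal_winnow : Prop := ∀ (hashes : List Int) (window : Int), Dom_winnow hashes window → Spec_winnow hashes window (winnow hashes window)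

-- ===== LEMMAS AND PROOFS =====

-- head value of a deque (0 is never used: the deque is nonempty wherever hval is read)
def hval (l : List (Int × Int)) : Int :=
  match l with
  | [] => 0
  | q :: _ => q.1

-- the (value, index) pairs of a window that are strictly smaller than every later value in the window:
-- exactly the content of A's monotonic deque
def smins : List (Int × Int) → List (Int × Int)
  | [] => []
  | x :: l => if l.all (fun q => decide (x.1 < q.1)) then x :: smins l else smins l

-- the window of pairs (value, index) ending at index i (A's dq after processing index i)
def winWin (hashes : List Int) (window : Int) (i : Nat) : List (Int × Int) :=
  (PySem.List.enumerate ((hashes.take (i + 1)).drop (i + 1 - window.toNat))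
      ((i + 1 - window.toNat : Nat) : Int)).map (fun p => (p.2, p.1))

-- A's selected-set after processing index i
def selSpec (hashes : List Int) (window : Int) : Nat → List Int
  | 0 => []
  | i + 1 =>
    if window - 1 ≤ (i : Int) + 1 then
      PySem.Set.add (selSpec hashes window i) (hval (smins (winWin hashes window (i + 1))))
    else selSpec hashes window i

theorem smins_cons (x : Int × Int) (l : List (Int × Int)) :
    smins (x :: l) = if l.all (fun q => decide (x.1 < q.1)) then x :: smins l else smins l := rfl

theorem mem_of_mem_smins {l : List (Int × Int)} {q : Int × Int} (h : q ∈ smins l) : q ∈ l := by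
  induction l with
  | nil => simpa [smins] using h
  | cons x t ih =>
    unfold smins at h
    split at h
    · rcases List.mem_cons.mp h with h' | h'
      · simp [h']
      · exact List.mem_cons_of_mem _ (ih h')
    · exact List.mem_cons_of_mem _ (ih h)

theorem smins_pairwise (l : List (Int × Int)) : (smins l).Pairwise (fun p q => p.1 < q.1) := by
  induction l with
  | nil => simp [smins]
  | cons x t ih =>
    unfold smins
    split
    · rename_i hall
      refine List.Pairwise.cons (fun q hq => ?_) ih
      have := mem_of_mem_smins hq
      simpa using List.all_eq_true.mp hall q this
    · exact ih

theorem smins_ne_nil {l : List (Int × Int)} (h : l ≠ []) : smins l ≠ [] := by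
  induction l with
  | nil => exact absurd rfl h
  | cons x t ih =>
    unfold smins
    split
    · simp
    · rename_i hall
      have : ∃ q ∈ t, ¬ x.1 < q.1 := by
        by_contra hc
        push_neg at hc
        exact hall (List.all_eq_true.mpr (fun q hq => by simpa using hc q hq))
      rcases this with ⟨q, hq, -⟩
      exact ih (by rintro rfl; simp at hq)

theorem smins_head_min {l : List (Int × Int)} (hne : l ≠ []) :
    ∃ q t, smins l = q :: t ∧ (∃ p ∈ l, p.1 = q.1) ∧ ∀ p ∈ l, q.1 ≤ p.1 := by
  induction l with
  | nil => exact absurd rfl hne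
  | cons x s ih =>
    unfold smins
    split
    · rename_i hall
      refine ⟨x, smins s, rfl, ⟨x, by simp⟩, ?_⟩
      intro p hp
      rcases List.mem_cons.mp hp with rfl | hp
      · exact le_refl _
      · exact le_of_lt (by simpa using List.all_eq_true.mp hall p hp)
    · rename_i hall
      have hex : ∃ q ∈ s, q.1 ≤ x.1 := by
        by_contra hc
        push_neg at hc
        exact hall (List.all_eq_true.mpr (fun q hq => by simpa using hc q hq))
      rcases hex with ⟨y, hy, hyx⟩
      have hs : s ≠ [] := by rintro rfl; simp at hy
      rcases ih hs with ⟨q, t, heq, hmem, hmin⟩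
      refine ⟨q, t, heq, ⟨hmem.choose, List.mem_cons_of_mem _ hmem.choose_spec.1, hmem.choose_spec.2⟩, ?_⟩
      intro p hp
      rcases List.mem_cons.mp hp with rfl | hp
      · exact le_trans (hmin y hy) hyx
      · exact hmin p hp

theorem smins_append (l : List (Int × Int)) (x : Int × Int) :
    smins (l ++ [x]) = (smins l).filter (fun q => decide (q.1 < x.1)) ++ [x] := by
  induction l with
  | nil => simp [smins]
  | cons y t ih =>
    show smins (y :: (t ++ [x])) = _
    unfold smins
    by_cases hy : t.all (fun q => decide (y.1 < q.1))
    · by_cases hx : y.1 < x.1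
      · rw [if_pos (by simp [List.all_append, hy, hx]), ih, if_pos hy]
        simp [hx]
      · rw [if_neg (by simp [List.all_append, hx]), ih, if_pos hy]
        simp [hx]
    · rw [if_neg (by simp only [List.all_append, Bool.and_eq_true]; intro hc; exact hy hc.1),
        ih, if_neg hy]

theorem dropWhile_ge_eq_filter (hv : Int) (m : List (Int × Int))
    (hm : m.Pairwise (fun p q => q.1 < p.1)) :
    m.dropWhile (fun q => decide (hv ≤ q.1)) = m.filter (fun q => decide (q.1 < hv)) := by
  induction m with
  | nil => simp
  | cons y t ih =>
    rcases List.pairwise_cons.mp hm with ⟨hall, ht⟩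
    by_cases hy : hv ≤ y.1
    · rw [List.dropWhile_cons_of_pos (by simpa using hy), ih ht,
        List.filter_cons_of_neg (by simpa using not_lt.mpr hy)]
    · push_neg at hy
      rw [List.dropWhile_cons_of_neg (by simpa using not_le.mpr hy),
        List.filter_cons_of_pos (by simpa using hy)]
      have : t.filter (fun q => decide (q.1 < hv)) = t :=
        List.filter_eq_self.mpr (fun q hq => by simpa using lt_trans (hall q hq) hy)
      rw [this]

theorem popBack_smins (l : List (Int × Int)) (hv : Int) :
    ((smins l).reverse.dropWhile (fun q => decide (hv ≤ q.1))).reverse =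
      (smins l).filter (fun q => decide (q.1 < hv)) := by
  rw [dropWhile_ge_eq_filter hv _ (List.pairwise_reverse.mpr (smins_pairwise l)),
    List.filter_reverse, List.reverse_reverse]

-- indices occurring in winWin are ≥ the window's left edge
theorem winWin_idx_lb {hashes : List Int} {window : Int} {i : Nat} {q : Int × Int}
    (hq : q ∈ winWin hashes window i) : ((i + 1 - window.toNat : Nat) : Int) ≤ q.2 := by
  unfold winWin at hq
  rcases List.mem_map.mp hq with ⟨p, hp, rfl⟩
  rcases (PySem.List.mem_enumerate_iff _ _ _).mp hp with ⟨k, hk, rfl⟩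
  simp

theorem winWin_ne_nil {hashes : List Int} {window : Int} {i : Nat}
    (hw : 2 ≤ window) (hi : i < hashes.length) : winWin hashes window i ≠ [] := by
  unfold winWin
  intro hc
  have := congrArg List.length hc
  simp [PySem.List.length_enumerate] at this
  omega

theorem winWin_values (hashes : List Int) (window : Int) (i : Nat) :
    (winWin hashes window i).map (fun q => q.1) =
      (hashes.take (i + 1)).drop (i + 1 - window.toNat) := by
  unfold winWin
  rw [List.map_map]
  exact PySem.List.map_snd_enumerate _ _

-- the deque transition: pop-back, append, pop-old turns the suffix-minima of window i into those of window i+1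
theorem dq_step (hashes : List Int) (window : Int) (hw : 2 ≤ window) (i : Nat)
    (hi : i + 1 < hashes.length) :
    (((smins (winWin hashes window i)).reverse.dropWhile
          (fun q => decide (hashes[i + 1] ≤ q.1))).reverse ++ [(hashes[i + 1], (i : Int) + 1)]).dropWhile
        (fun q => decide (q.2 ≤ (i : Int) + 1 - window)) =
      smins (winWin hashes window (i + 1)) := by
  rw [popBack_smins]
  have happ := smins_append (winWin hashes window i) (hashes[i + 1], (i : Int) + 1)
  dsimp only at happ
  rw [← happ]
  have hw' : 2 ≤ window.toNat := by omega
  have htk : hashes.take (i + 1 + 1) = hashes.take (i + 1) ++ [hashes[i + 1]] := by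
    rw [List.take_succ, List.getElem?_eq_getElem hi]
    rfl
  have hlen : (hashes.take (i + 1)).length = i + 1 := by
    simp
    omega
  have hext : (hashes.take (i + 1 + 1)).drop (i + 1 - window.toNat) =
      (hashes.take (i + 1)).drop (i + 1 - window.toNat) ++ [hashes[i + 1]] := by
    rw [htk, List.drop_append_of_le_length (by omega)]
  have hdlen : ((hashes.take (i + 1)).drop (i + 1 - window.toNat)).length =
      i + 1 - (i + 1 - window.toNat) := by
    simp
    omega
  have hwwext : winWin hashes window i ++ [(hashes[i + 1], (i : Int) + 1)] =
      (PySem.List.enumerate ((hashes.take (i + 1 + 1)).drop (i + 1 - window.toNat))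
          ((i + 1 - window.toNat : Nat) : Int)).map (fun p => (p.2, p.1)) := by
    rw [hext, PySem.List.enumerate_append, List.map_append]
    unfold winWin
    congr 1
    rw [hdlen]
    have hcast : ((i + 1 - window.toNat : Nat) : Int) + ((i + 1 - (i + 1 - window.toNat) : Nat) : Int) =
        (i : Int) + 1 := by omega
    rw [hcast]
    rfl
  rw [hwwext]
  by_cases hsmall : i + 2 ≤ window.toNat
  · have hsame :
        (PySem.List.enumerate ((hashes.take (i + 1 + 1)).drop (i + 1 - window.toNat))
            ((i + 1 - window.toNat : Nat) : Int)).map (fun p => (p.2, p.1)) =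
          winWin hashes window (i + 1) := by
      unfold winWin
      have h1 : i + 1 - window.toNat = 0 := by omega
      have h2 : i + 1 + 1 - window.toNat = 0 := by omega
      rw [h1, h2]
    rw [hsame]
    rcases hq : smins (winWin hashes window (i + 1)) with _ | ⟨q, t⟩
    · rfl
    · have hmem : q ∈ winWin hashes window (i + 1) :=
        mem_of_mem_smins (hq ▸ List.mem_cons_self)
      have hlb := winWin_idx_lb hmem
      rw [List.dropWhile_cons_of_neg (by simp; omega)]
  · have hfull : window.toNat ≤ i + 1 := by omega
    have hslen : ((hashes.take (i + 1 + 1)).drop (i + 1 - window.toNat)).length =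
        window.toNat + 1 := by
      simp
      omega
    rcases hs : (hashes.take (i + 1 + 1)).drop (i + 1 - window.toNat) with _ | ⟨c, rest⟩
    · rw [hs] at hslen
      simp at hslen
    · have hrest : (hashes.take (i + 1 + 1)).drop (i + 1 - window.toNat + 1) = rest := by
        have h' := congrArg (List.drop 1) hs
        rw [List.drop_drop] at h'
        simpa using h'
      have hwin1 : winWin hashes window (i + 1) =
          (PySem.List.enumerate rest (((i + 1 - window.toNat : Nat) : Int) + 1)).map
            (fun p => (p.2, p.1)) := by
        unfold winWin
        have h1 : i + 1 + 1 - window.toNat = i + 1 - window.toNat + 1 := by omega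
        rw [h1, hrest]
        have h2 : ((i + 1 - window.toNat + 1 : Nat) : Int) = ((i + 1 - window.toNat : Nat) : Int) + 1 := by
          push_cast
          ring
        rw [h2]
      rw [PySem.List.enumerate_cons, List.map_cons]
      have hM : ∀ q ∈ (PySem.List.enumerate rest (((i + 1 - window.toNat : Nat) : Int) + 1)).map
          (fun p => (p.2, p.1)), ¬ (q.2 ≤ (i : Int) + 1 - window) := by
        intro q hq
        rcases List.mem_map.mp hq with ⟨p, hp, rfl⟩
        rcases (PySem.List.mem_enumerate_iff _ _ _).mp hp with ⟨k, hk, rfl⟩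
        simp only
        omega
      have hdropM : ∀ (m : List (Int × Int)), (∀ q ∈ m, ¬ (q.2 ≤ (i : Int) + 1 - window)) →
          m.dropWhile (fun q => decide (q.2 ≤ (i : Int) + 1 - window)) = m := by
        intro m hm
        rcases m with _ | ⟨q, t⟩
        · rfl
        · rw [List.dropWhile_cons_of_neg (by simpa using hm q List.mem_cons_self)]
      have hMsm : ∀ q ∈ smins ((PySem.List.enumerate rest (((i + 1 - window.toNat : Nat) : Int) + 1)).map
          (fun p => (p.2, p.1))), ¬ (q.2 ≤ (i : Int) + 1 - window) :=
        fun q hq => hM q (mem_of_mem_smins hq)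
      have hcpred : ((c, ((i + 1 - window.toNat : Nat) : Int)).2 ≤ (i : Int) + 1 - window) := by
        simp only
        omega
      rw [hwin1]
      show List.dropWhile (fun q => decide (q.2 ≤ (i : Int) + 1 - window))
          (smins ((c, ((i + 1 - window.toNat : Nat) : Int)) ::
            (PySem.List.enumerate rest (((i + 1 - window.toNat : Nat) : Int) + 1)).map
              (fun p => (p.2, p.1)))) = _
      rw [smins_cons]
      split
      · rw [List.dropWhile_cons_of_pos (by simpa using hcpred)]
        exact hdropM _ hMsm
      · exact hdropM _ hMsm

-- the per-window minimum B computes is the head value of A's deque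
theorem minslice (hashes : List Int) (window : Int) (hw : 2 ≤ window) (i : Nat)
    (hi : i < hashes.length) (hfull : window ≤ (i : Int) + 1) :
    PySem.List.min? (PySem.List.slice hashes (some ((i : Int) + 1 - window))
        (some ((i : Int) + 1 - window + window))) (fun x => x) =
      some (hval (smins (winWin hashes window i))) := by
  have h0 : (0 : Int) ≤ (i : Int) + 1 - window := by omega
  rw [show (i : Int) + 1 - window + window = (i : Int) + 1 by ring,
    PySem.List.slice_toNat hashes h0 (by omega)]
  have ht1 : ((i : Int) + 1).toNat = i + 1 := by omega
  have ht2 : ((i : Int) + 1 - window).toNat = i + 1 - window.toNat := by omega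
  rw [ht1, ht2, ← List.drop_take]
  have hvals := winWin_values hashes window i
  have hne : winWin hashes window i ≠ [] := winWin_ne_nil hw hi
  have hsne : (hashes.take (i + 1)).drop (i + 1 - window.toNat) ≠ [] := by
    rw [← hvals]
    simp [hne]
  rcases hmin : PySem.List.min? ((hashes.take (i + 1)).drop (i + 1 - window.toNat)) (fun x => x)
      with _ | m
  · rw [PySem.List.min?_eq_none_iff] at hmin
    exact absurd hmin hsne
  · rcases smins_head_min hne with ⟨q, t, heq, ⟨p, hp, hpq⟩, hmq⟩
    rw [heq]
    dsimp [hval]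
    have hq1s : q.1 ∈ (hashes.take (i + 1)).drop (i + 1 - window.toNat) := by
      rw [← hvals]
      exact List.mem_map.mpr ⟨p, hp, hpq⟩
    have h1 : m ≤ q.1 := PySem.List.min?_isMin hmin q.1 hq1s
    have h2 : q.1 ≤ m := by
      have hm : m ∈ (hashes.take (i + 1)).drop (i + 1 - window.toNat) :=
        PySem.List.min?_mem hmin
      rw [← hvals] at hm
      rcases List.mem_map.mp hm with ⟨p', hp', rfl⟩
      exact hmq p' hp'
    rw [le_antisymm h1 h2]

-- invariant of A's fold: after the first i+1 elements the state is (selSpec i, smins (window i))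
theorem foldA_inv (hashes : List Int) (window : Int) (hw : 2 ≤ window) :
    ∀ i, i < hashes.length →
      ((PySem.List.enumerate hashes).take (i + 1)).foldl (winnowStep window)
          (([], []) : List Int × List (Int × Int)) =
        (selSpec hashes window i, smins (winWin hashes window i)) := by
  intro i
  induction i with
  | zero =>
    intro h0
    rcases hx : hashes with _ | ⟨a, t⟩
    · subst hx
      simp at h0
    · subst hx
      rw [PySem.List.enumerate_cons]
      show List.foldl (winnowStep window) ([], [])
          (List.take (0 + 1) ((0, a) :: PySem.List.enumerate t (0 + 1))) = _
      rw [List.take_succ_cons, List.take_zero]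
      simp only [List.foldl_cons, List.foldl_nil]
      unfold winnowStep
      dsimp only
      simp only [List.reverse_nil, List.dropWhile_nil, List.nil_append]
      rw [List.dropWhile_cons_of_neg (by simp; omega), if_neg (by omega)]
      have h1 : 0 + 1 - window.toNat = 0 := by omega
      unfold winWin
      rw [h1]
      simp [selSpec, smins, PySem.List.enumerate_cons, PySem.List.enumerate_nil,
        List.take_succ_cons]
  | succ i ih =>
    intro hi1
    have hi : i < hashes.length := by omega
    have hget : (PySem.List.enumerate hashes)[i + 1]? = some ((i : Int) + 1, hashes[i + 1]) := by
      rw [PySem.List.getElem?_enumerate, List.getElem?_eq_getElem hi1]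
      simp
    have htake : (PySem.List.enumerate hashes).take (i + 1 + 1) =
        (PySem.List.enumerate hashes).take (i + 1) ++ [((i : Int) + 1, hashes[i + 1])] := by
      rw [List.take_succ, hget]
      rfl
    rw [htake, List.foldl_append, ih hi]
    simp only [List.foldl_cons, List.foldl_nil]
    have hdq := dq_step hashes window hw i hi1
    unfold winnowStep
    dsimp only
    rw [hdq]
    by_cases hfull : window - 1 ≤ (i : Int) + 1
    · rw [if_pos hfull]
      rcases hq : smins (winWin hashes window (i + 1)) with _ | ⟨q, t⟩
      · exact absurd hq (smins_ne_nil (winWin_ne_nil hw (by omega)))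
      · have hsel : selSpec hashes window (i + 1) =
            PySem.Set.add (selSpec hashes window i) q.1 := by
          simp only [selSpec]
          rw [if_pos hfull, hq]
          rfl
        rw [hsel]
    · rw [if_neg hfull]
      have hsel : selSpec hashes window (i + 1) = selSpec hashes window i := by
        simp only [selSpec]
        rw [if_neg hfull]
      rw [hsel]

-- B's fold up to window-end index i equals selSpec i
theorem foldB_inv (hashes : List Int) (window : Int) (hw : 2 ≤ window) :
    ∀ i, i < hashes.length →
      (PySem.List.pyRange 0 ((i : Int) - window + 2)).foldl
          (fun acc j =>
            match PySem.List.min? (PySem.List.slice hashes (some j) (some (j + window))) (fun x => x) with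
            | none => acc
            | some m => PySem.Set.add acc m) [] =
        selSpec hashes window i := by
  intro i
  induction i with
  | zero =>
    intro _
    rw [PySem.List.pyRange_one_eq_nil (by omega)]
    rfl
  | succ i ih =>
    intro hi1
    by_cases hfull : window - 1 ≤ (i : Int) + 1
    · have hr : ((i + 1 : Nat) : Int) - window + 2 = ((i : Int) - window + 2) + 1 := by
        push_cast
        ring
      rw [hr, PySem.List.pyRange_one_succ_right (by omega), List.foldl_append,
        ih (by omega)]
      simp only [List.foldl_cons, List.foldl_nil]
      have hms := minslice hashes window hw (i + 1) hi1 (by push_cast; omega)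
      have ha1 : ((i + 1 : Nat) : Int) + 1 - window = (i : Int) - window + 2 := by
        push_cast
        ring
      rw [ha1] at hms
      rw [hms]
      have hsel : selSpec hashes window (i + 1) =
          PySem.Set.add (selSpec hashes window i)
            (hval (smins (winWin hashes window (i + 1)))) := by
        simp only [selSpec]
        rw [if_pos hfull]
      rw [hsel]
    · rw [PySem.List.pyRange_one_eq_nil (by push_cast; omega)]
      have hprev := ih (by omega)
      rw [PySem.List.pyRange_one_eq_nil (by omega)] at hprev
      have hsel : selSpec hashes window (i + 1) = selSpec hashes window i := by
        simp only [selSpec]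
        rw [if_neg hfull]
      rw [hsel, ← hprev]

-- ===== VERDICT (by name: the statement is the Claim_ definition above) =====
theorem winnow_spec : Claim_equal_winnow := by
  unfold Claim_equal_winnow
  intro hashes window _
  unfold Spec_winnow winnow winnow_alt
  by_cases hnil : hashes = []
  · simp [hnil]
  · rw [if_neg hnil, if_neg hnil]
    by_cases hw1 : window ≤ 1
    · rw [if_pos hw1, if_pos hw1]
    · rw [if_neg hw1, if_neg hw1]
      have hw : 2 ≤ window := by omega
      have hn : 0 < hashes.length := List.length_pos_iff.mpr hnil
      have hA := foldA_inv hashes window hw (hashes.length - 1) (by omega)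
      have htake : (PySem.List.enumerate hashes).take (hashes.length - 1 + 1) =
          PySem.List.enumerate hashes := by
        rw [Nat.sub_add_cancel hn]
        exact List.take_of_length_le (by rw [PySem.List.length_enumerate])
      rw [htake] at hA
      rw [hA]
      have hB := foldB_inv hashes window hw (hashes.length - 1) (by omega)
      have harg : ((hashes.length - 1 : Nat) : Int) - window + 2 =
          PySem.List.len hashes - window + 1 := by
        rw [PySem.List.len_eq]; omega
      rw [harg] at hB
      exact hB.symm
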